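-- pv_equiv track=rewrite | github.com/capitalart/artlomo | application/tools/markdown-file-fixes/fix-stacks-markdown.py | fix_md040_fenced_code_language
-- ===== SOURCE A (Python) =====
-- def fix_md040_fenced_code_language(content: str) -> str:
--     """Fix MD040: Add default language to unlabeled fenced code blocks."""
--     lines = content.split('\n')
--     fixed = []
--     in_code_block = False
--
--     for line in lines:
--         stripped = line.strip()
--         if not stripped.startswith('```'):
--             fixed.append(line)
--             continue
--
--         if not in_code_block:
--             if stripped == '```':
--                 indent = line[:len(line) - len(line.lstrip())]
--                 fixed.append(f"{indent}```text")
--             else: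
--                 fixed.append(line)
--             in_code_block = True
--         else:
--             fixed.append(line)
--             in_code_block = False
--
--     return '\n'.join(fixed)
-- ===== SOURCE B (Python) =====
-- def fix_md040_fenced_code_language(content: str) -> str:
--     """Fix MD040 via a two-pass decomposition: first rank every fence line by a
--     dict index -> rank, then rebuild in one comprehension, relabelling only
--     even-ranked (opening) bare fences."""
--     lines = content.split('\n')
--     fence_rank = {}
--     for i, line in enumerate(lines):
--         if line.strip().startswith('```'):
--             fence_rank[i] = len(fence_rank)
--
--     def render(i, line):
--         if line.strip() == '```' and fence_rank[i] % 2 == 0: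
--             indent = line[:len(line) - len(line.lstrip())]
--             return indent + '```text'
--         return line
--
--     return '\n'.join(render(i, line) for i, line in enumerate(lines))
-- ===== Notes on version B (the rewrite author's own statement) =====
-- stated objective: alternative
-- what changed: Replaces A's single pass with a mutable in_code_block toggle by a two-pass decomposition: a first pass builds a dict mapping each fence-line index to its rank, then a comprehension rebuilds the output, relabelling exactly the even-ranked bare fences (openers).
import Mathlib
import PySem

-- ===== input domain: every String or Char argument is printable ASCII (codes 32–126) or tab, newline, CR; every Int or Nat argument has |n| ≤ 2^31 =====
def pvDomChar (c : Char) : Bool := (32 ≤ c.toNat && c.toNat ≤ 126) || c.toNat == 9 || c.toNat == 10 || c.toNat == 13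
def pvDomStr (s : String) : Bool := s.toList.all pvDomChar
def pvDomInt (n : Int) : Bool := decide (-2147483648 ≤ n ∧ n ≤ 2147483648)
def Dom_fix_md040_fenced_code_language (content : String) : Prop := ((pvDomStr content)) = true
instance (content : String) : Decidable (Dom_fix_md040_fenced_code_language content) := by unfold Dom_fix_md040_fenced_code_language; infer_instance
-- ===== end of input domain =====

-- B replaces A's single pass with a mutable toggle by a two-pass decomposition
-- (rank every fence line in a dict, then rebuild relabelling even-ranked bare
-- fences); same cost, alternative structure.

-- ===== PORT A =====
-- indent = line[:len(line) - len(line.lstrip())]; f"{indent}```text"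
def pvRelabel (line : String) : String :=
  PySem.Str.slice line none
    (some (PySem.Str.len line - PySem.Str.len (PySem.Str.lstrip line)))
  ++ "```text"

-- the body of A's `for line in lines` loop over the state (fixed, in_code_block)
def pvStepA (st : List String × Bool) (line : String) : List String × Bool :=
  let stripped := PySem.Str.strip line
  if ¬ (PySem.Str.startswith stripped "```" = true) then (st.1 ++ [line], st.2)
  else if st.2 = false then
    (st.1 ++ [if stripped = "```" then pvRelabel line else line], true)
  else
    (st.1 ++ [line], false)

def fix_md040_fenced_code_language (content : String) : String :=
  let lines := (PySem.Str.split? content "\n").getD []  -- "\n" ≠ "", so split? is always some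
  PySem.Str.join "\n" ((lines.foldl pvStepA ([], false)).1)

-- ===== PORT B =====
-- the body of B's first loop: fence_rank[i] = len(fence_rank) for fence lines
def pvBStep (d : PySem.Dict Int Int) (p : Int × String) : PySem.Dict Int Int :=
  if PySem.Str.startswith (PySem.Str.strip p.2) "```" then d.insert p.1 (PySem.Dict.size d : Int) else d

def pvRankDict (lines : List String) : PySem.Dict Int Int :=
  (PySem.List.enumerate lines).foldl pvBStep PySem.Dict.empty

-- fence_rank[i] is only read when line.strip() == '```', which guarantees i is a
-- key (Python's `and` short-circuits), so getD's default is never the result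
def pvRender (fence_rank : PySem.Dict Int Int) (i : Int) (line : String) : String :=
  if (decide (PySem.Str.strip line = "```") && (PySem.Int.mod (fence_rank.getD i 0) 2 == 0)) then
    pvRelabel line
  else line

def fix_md040_fenced_code_language_alt (content : String) : String :=
  let lines := (PySem.Str.split? content "\n").getD []  -- "\n" ≠ "", so split? is always some
  let fence_rank := pvRankDict lines
  PySem.Str.join "\n" ((PySem.List.enumerate lines).map (fun p => pvRender fence_rank p.1 p.2))

-- ===== PRECONDITION & SPEC =====
def Spec_fix_md040_fenced_code_language (content : String) (out : String) : Prop := out = fix_md040_fenced_code_language_alt content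
instance (content : String) (out : String) : Decidable (Spec_fix_md040_fenced_code_language content out) := by unfold Spec_fix_md040_fenced_code_language; infer_instance

-- ===== CLAIM (what is proved, stated in full; the proofs are below) =====
def Claim_equal_fix_md040_fenced_code_language : Prop := ∀ (content : String), Dom_fix_md040_fenced_code_language content → Spec_fix_md040_fenced_code_language content (fix_md040_fenced_code_language content)

-- ===== LEMMAS AND PROOFS =====

-- abbreviations for the two per-line tests both programs make
def pvF (line : String) : Bool := PySem.Str.startswith (PySem.Str.strip line) "```"
def pvG (line : String) : Bool := decide (PySem.Str.strip line = "```")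

lemma pvG_fence (l : String) (h : pvG l = true) : pvF l = true := by
  simp only [pvG, decide_eq_true_eq] at h
  simp only [pvF, h]
  decide

lemma pvF_chars (l : String) :
    pvF l = PySem.Chars.startswith (PySem.Chars.strip l.toList) ['`', '`', '`'] := by
  simp [pvF]

-- the common functional description of the output line list, driven by a Bool
-- "inside a code block" state
def pvProcA : Bool → List String → List String
  | _, [] => []
  | b, l :: ls =>
    if pvF l then (if !b && pvG l then pvRelabel l else l) :: pvProcA (!b) ls
    else l :: pvProcA b ls

lemma pvProcA_cons (b : Bool) (l : String) (ls : List String) :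
    pvProcA b (l :: ls) =
      (if pvF l then (if !b && pvG l then pvRelabel l else l) :: pvProcA (!b) ls
       else l :: pvProcA b ls) := rfl

def pvCnt (ls : List String) : Nat := ls.countP (fun l => pvF l)

lemma foldA_eq (ls : List String) : ∀ (acc : List String) (b : Bool),
    (ls.foldl pvStepA (acc, b)).1 = acc ++ pvProcA b ls := by
  induction ls with
  | nil => intro acc b; simp [pvProcA]
  | cons l ls ih =>
    intro acc b
    rw [List.foldl_cons]
    have hstep : pvStepA (acc, b) l =
        (acc ++ [if pvF l then (if !b && pvG l then pvRelabel l else l) else l],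
         if pvF l then !b else b) := by
      unfold pvStepA pvF pvG
      by_cases hf : PySem.Str.startswith (PySem.Str.strip l) "```" = true
      · have hb : PySem.Str.startswith "```" "```" = true := by decide
        cases b <;> by_cases hg : PySem.Str.strip l = "```" <;>
          simp [hf, hg, hb, -PySem.Str.startswith_eq, -PySem.Str.toList_strip]
      · simp [hf, -PySem.Str.startswith_eq, -PySem.Str.toList_strip]
    rw [hstep, ih, pvProcA_cons]
    by_cases hf : pvF l = true <;> simp [hf]

lemma fold_get?_lt (ls : List String) : ∀ (s : Int) (d : PySem.Dict Int Int) (j : Int), j < s →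
    ((PySem.List.enumerate ls s).foldl pvBStep d).get? j = d.get? j := by
  induction ls with
  | nil => intro s d j _; simp [PySem.List.enumerate_nil]
  | cons l ls ih =>
    intro s d j hj
    rw [PySem.List.enumerate_cons, List.foldl_cons, ih (s + 1) _ j (by omega)]
    cases hf : pvF l
    · have h1 : pvBStep d (s, l) = d := by simp [pvBStep, ← pvF_chars, hf]
      rw [h1]
    · have h1 : pvBStep d (s, l) = d.insert s (PySem.Dict.size d : Int) := by
        simp [pvBStep, ← pvF_chars, hf]
      rw [h1, PySem.Dict.get?_insert_of_ne _ _ (by omega : j ≠ s)]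

lemma rank_spec (ls : List String) : ∀ (s : Int) (d : PySem.Dict Int Int),
    (∀ j : Int, d.contains j = true → j < s) →
    ∀ (k : Nat) (hk : k < ls.length), pvF ls[k] = true →
      ((PySem.List.enumerate ls s).foldl pvBStep d).getD (s + k) 0
        = (PySem.Dict.size d : Int) + (pvCnt (ls.take k) : Int) := by
  induction ls with
  | nil => intro s d _ k hk; simp at hk
  | cons l ls ih =>
    intro s d hfresh k hk hfk
    have hfreshs : d.contains s = false := by
      cases h : d.contains s
      · rfl
      · exact absurd (hfresh s h) (by omega)
    have hstep : ∀ j : Int, (pvBStep d (s, l)).contains j = true → j < s + 1 := by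
      intro j hj
      cases hf : pvF l
      · have h1 : pvBStep d (s, l) = d := by simp [pvBStep, ← pvF_chars, hf]
        rw [h1] at hj
        have := hfresh j hj; omega
      · have h1 : pvBStep d (s, l) = d.insert s (PySem.Dict.size d : Int) := by
          simp [pvBStep, ← pvF_chars, hf]
        rw [h1, PySem.Dict.contains_insert] at hj
        rcases Bool.or_eq_true_iff.mp hj with h | h
        · have := eq_of_beq h; omega
        · have := hfresh j h; omega
    rw [PySem.List.enumerate_cons, List.foldl_cons]
    cases k with
    | zero =>
      simp only [List.getElem_cons_zero] at hfk
      have h1 : pvBStep d (s, l) = d.insert s (PySem.Dict.size d : Int) := by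
        simp [pvBStep, ← pvF_chars, hfk]
      rw [PySem.Dict.getD_eq_get?_getD, show s + ((0 : Nat) : Int) = s by omega,
        fold_get?_lt ls (s + 1) _ s (by omega), h1, PySem.Dict.get?_insert_self]
      simp [pvCnt]
    | succ k =>
      simp only [List.getElem_cons_succ] at hfk
      have hrec := ih (s + 1) (pvBStep d (s, l)) hstep k (by simpa using hk) hfk
      rw [show s + (((k + 1 : Nat)) : Int) = (s + 1) + (k : Nat) by push_cast; ring, hrec]
      have hsize : (PySem.Dict.size (pvBStep d (s, l)) : Int)
          = (PySem.Dict.size d : Int) + (if pvF l then 1 else 0) := by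
        cases hf : pvF l
        · have h1 : pvBStep d (s, l) = d := by simp [pvBStep, ← pvF_chars, hf]
          rw [h1]; simp
        · have h1 : pvBStep d (s, l) = d.insert s (PySem.Dict.size d : Int) := by
            simp [pvBStep, ← pvF_chars, hf]
          rw [h1, PySem.Dict.size_insert, hfreshs]
          simp
      have hcnt : (pvCnt ((l :: ls).take (k + 1)) : Int)
          = (if pvF l then 1 else 0) + (pvCnt (ls.take k) : Int) := by
        simp only [List.take_succ_cons, pvCnt, List.countP_cons]
        cases hf : pvF l
        · simp [hf]
        · simp [hf]; ring
      rw [hsize, hcnt]; ring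

lemma mod2_even (c : Nat) : (PySem.Int.mod (c : Int) 2 == 0) = !(c % 2 == 1) := by
  have h : PySem.Int.mod (c : Int) 2 = ((c % 2 : Nat) : Int) := by
    rw [PySem.Int.mod, Int.fmod_eq_emod]
    omega
  rw [h]
  rcases Nat.mod_two_eq_zero_or_one c with hc | hc <;> simp [hc]

lemma succ_mod2 (c : Nat) : ((c + 1) % 2 == 1) = !(c % 2 == 1) := by
  rcases Nat.mod_two_eq_zero_or_one c with h | h <;> simp [Nat.add_mod, h]

lemma mapB_eq (ls : List String) : ∀ (s : Int) (c : Nat) (d : PySem.Dict Int Int),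
    (∀ (k : Nat) (hk : k < ls.length), pvF ls[k] = true →
        d.getD (s + k) 0 = (c : Int) + (pvCnt (ls.take k) : Int)) →
    (PySem.List.enumerate ls s).map (fun p => pvRender d p.1 p.2) = pvProcA (c % 2 == 1) ls := by
  induction ls with
  | nil => intro s c d _; simp [PySem.List.enumerate_nil, pvProcA]
  | cons l ls ih =>
    intro s c d hd
    rw [PySem.List.enumerate_cons, List.map_cons]
    by_cases hf : pvF l = true
    · have h0 : d.getD s 0 = (c : Int) := by
        have := hd 0 (by simp) (by simpa using hf)
        simpa [pvCnt] using this
      have hhead : pvRender d s l = (if !(c % 2 == 1) && pvG l then pvRelabel l else l) := by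
        unfold pvRender
        rw [h0, mod2_even]
        simp [pvG, Bool.and_comm]
      have htail := ih (s + 1) (c + 1) d (by
        intro k hk hfk
        have := hd (k + 1) (by simpa using hk) (by simpa using hfk)
        rw [show s + (((k + 1 : Nat)) : Int) = (s + 1) + (k : Nat) by push_cast; ring] at this
        rw [this]
        simp only [List.take_succ_cons, pvCnt, List.countP_cons, hf]
        push_cast
        ring)
      rw [hhead, htail, succ_mod2, pvProcA_cons]
      simp [hf]
    · have hg : pvG l = false := by
        cases h : pvG l
        · rfl
        · exact absurd (pvG_fence l h) hf
      have hg' : (decide (PySem.Str.strip l = "```")) = false := hg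
      have hhead : pvRender d s l = l := by
        unfold pvRender
        rw [hg']
        simp
      have htail := ih (s + 1) c d (by
        intro k hk hfk
        have := hd (k + 1) (by simpa using hk) (by simpa using hfk)
        rw [show s + (((k + 1 : Nat)) : Int) = (s + 1) + (k : Nat) by push_cast; ring] at this
        rw [this]
        simp only [List.take_succ_cons, pvCnt, List.countP_cons, hf]
        simp)
      rw [hhead, htail, pvProcA_cons]
      simp [hf]

lemma pv_main (lines : List String) :
    PySem.Str.join "\n" ((lines.foldl pvStepA ([], false)).1)
      = PySem.Str.join "\n"
          ((PySem.List.enumerate lines).map (fun p => pvRender (pvRankDict lines) p.1 p.2)) := by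
  congr 1
  rw [foldA_eq lines [] false, List.nil_append,
    mapB_eq lines 0 0 (pvRankDict lines) (by
      intro k hk hfk
      have := rank_spec lines 0 PySem.Dict.empty (by intro j hj; simp at hj) k hk hfk
      simpa [pvRankDict] using this)]
  have h01 : ((0 % 2 : Nat) == 1) = false := by decide
  rw [h01]

-- ===== VERDICT (by name: the statement is the Claim_ definition above) =====
theorem fix_md040_fenced_code_language_spec : Claim_equal_fix_md040_fenced_code_language := by
  unfold Claim_equal_fix_md040_fenced_code_language Spec_fix_md040_fenced_code_language
  intro content _
  exact pv_main ((PySem.Str.split? content "\n").getD [])
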